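-- pv_equiv track=rewrite | github.com/vibharrao/bioinformatics_models_algorithms | assignment9/code.py | find_inbred_segments
-- ===== SOURCE A (Python) =====
-- def find_inbred_segments(individual, positions, states):
--     """Finds consecutive inbred segments based on state path and computes their lengths."""
--     inbred_segments = []
--     start = None
--
--     for i, state in enumerate(states):
--         if state == 0:  # Inbred state
--             if start is None:
--                 start = positions[i]
--         else:
--             if start is not None:
--                 stop = positions[i-1]
--                 inbred_segments.append((individual, start, stop))
--                 start = None
--
--     if start is not None:
--         stop = positions[-1]
--         inbred_segments.append((individual, start, stop))
--
--     return inbred_segments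
-- ===== SOURCE B (Python) =====
-- def find_inbred_segments(individual, positions, states):
--     """Finds consecutive inbred segments based on state path and computes their lengths."""
--     segments = []
--     n = len(states)
--     i = 0
--     while i < n:
--         # scan to the end of the maximal run of equal states starting at i
--         j = i + 1
--         while j < n and states[j] == states[i]:
--             j += 1
--         if states[i] == 0:  # inbred run: ends at its last site, or the final position if it reaches the end
--             stop = positions[j - 1] if j < n else positions[-1]
--             segments.append((individual, positions[i], stop))
--         i = j
--     return segments
-- ===== Notes on version B (the rewrite author's own statement) =====
-- stated objective: alternative
-- what changed: Replaces A's start-sentinel state machine (one pass flipping an Optional start and a post-loop flush) by a run-partition scan: an outer loop that finds each maximal run of equal states and emits one segment per zero run, with the trailing run handled uniformly.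
import Mathlib
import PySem

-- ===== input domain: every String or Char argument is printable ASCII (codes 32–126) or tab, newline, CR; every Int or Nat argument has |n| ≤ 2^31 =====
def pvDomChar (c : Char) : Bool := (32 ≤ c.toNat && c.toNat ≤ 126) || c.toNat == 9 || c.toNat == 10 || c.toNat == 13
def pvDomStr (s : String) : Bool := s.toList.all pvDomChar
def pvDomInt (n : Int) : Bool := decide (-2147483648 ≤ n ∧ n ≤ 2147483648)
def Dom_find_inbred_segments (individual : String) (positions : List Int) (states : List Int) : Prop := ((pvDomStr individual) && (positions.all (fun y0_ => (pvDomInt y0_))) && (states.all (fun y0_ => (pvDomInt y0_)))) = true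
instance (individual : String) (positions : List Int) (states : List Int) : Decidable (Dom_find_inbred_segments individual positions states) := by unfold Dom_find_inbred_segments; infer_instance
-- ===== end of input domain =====

-- B replaces A's start-sentinel state machine by a run-partition scan (find each maximal run of
-- equal states, emit one segment per zero run); same cost, plainer decomposition (objective: alternative).

-- ===== PORT A =====
-- A's for-loop over enumerate(states) with state (start, inbred_segments), then the post-loop flush.
def pvAGo (individual : String) (positions : List Int) :
    Option Int → List (String × Int × Int) → Nat → List Int → List (String × Int × Int)
  | start, segs, _i, [] =>
      match start with
      | some s => segs ++ [(individual, s, (PySem.List.pyGet? positions (-1)).getD 0)]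
      | none => segs
  | start, segs, i, state :: rest =>
      if state = 0 then
        match start with
        | none => pvAGo individual positions (some ((PySem.List.pyGet? positions (i : Int)).getD 0)) segs (i+1) rest
        | some s => pvAGo individual positions (some s) segs (i+1) rest
      else
        match start with
        | some s => pvAGo individual positions none (segs ++ [(individual, s, (PySem.List.pyGet? positions ((i : Int) - 1)).getD 0)]) (i+1) rest
        | none => pvAGo individual positions none segs (i+1) rest

def find_inbred_segments (individual : String) (positions : List Int) (states : List Int) : List (String × Int × Int) :=
  pvAGo individual positions none [] 0 states

-- ===== PORT B =====
-- inner while loop of Source B: how many further elements continue the run of value v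
def pvRunLen (v : Int) : List Int → Nat
  | [] => 0
  | s :: rest => if s = v then 1 + pvRunLen v rest else 0

-- outer while loop of Source B: at index i with suffix l, consume one maximal run, emit if its value is 0
def pvBGo (individual : String) (positions : List Int) (n : Nat) :
    Nat → List Int → List (String × Int × Int)
  | _i, [] => []
  | i, s :: rest =>
      let r := pvRunLen s rest
      let j := i + 1 + r
      let seg : List (String × Int × Int) :=
        if s = 0 then
          [(individual, (PySem.List.pyGet? positions (i : Int)).getD 0,
            if j < n then (PySem.List.pyGet? positions ((j : Int) - 1)).getD 0
            else (PySem.List.pyGet? positions (-1)).getD 0)]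
        else []
      seg ++ pvBGo individual positions n j (rest.drop r)
  termination_by _ l => l.length
  decreasing_by simp only [List.length_drop, List.length_cons]; omega

def find_inbred_segments_alt (individual : String) (positions : List Int) (states : List Int) : List (String × Int × Int) :=
  pvBGo individual positions states.length 0 states

-- ===== PRECONDITION & SPEC =====
-- Pre_ excludes exactly the inputs on which Python A raises IndexError: positions is read at the
-- first index of each zero run, at the index just before each zero-run's end, and (nonempty, via
-- the first clause) at -1 for a trailing zero run.
def Pre_find_inbred_segments (individual : String) (positions : List Int) (states : List Int) : Prop :=
  ∀ i < states.length,
    ((states.getD i 1 = 0 ∧ (i = 0 ∨ states.getD (i-1) 1 ≠ 0)) → i < positions.length) ∧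
    ((states.getD i 1 ≠ 0 ∧ 1 ≤ i ∧ states.getD (i-1) 1 = 0) → i - 1 < positions.length)
instance (individual : String) (positions : List Int) (states : List Int) : Decidable (Pre_find_inbred_segments individual positions states) := by unfold Pre_find_inbred_segments; infer_instance

def pvWitness_find_inbred_segments : String × List Int × List Int := ("NA12878", [10, 20, 30, 40], [0, 0, 1, 0])

def Spec_find_inbred_segments (individual : String) (positions : List Int) (states : List Int) (out : List (String × Int × Int)) : Prop := out = find_inbred_segments_alt individual positions states
instance (individual : String) (positions : List Int) (states : List Int) (out : List (String × Int × Int)) : Decidable (Spec_find_inbred_segments individual positions states out) := by unfold Spec_find_inbred_segments; infer_instance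

-- ===== CLAIM (what is proved, stated in full; the proofs are below) =====
def Claim_equal_find_inbred_segments : Prop := ∀ (individual : String) (positions : List Int) (states : List Int), Dom_find_inbred_segments individual positions states → Pre_find_inbred_segments individual positions states → Spec_find_inbred_segments individual positions states (find_inbred_segments individual positions states)

-- ===== LEMMAS AND PROOFS =====

theorem pvRunLen_le (v : Int) (l : List Int) : pvRunLen v l ≤ l.length := by
  induction l with
  | nil => simp [pvRunLen]
  | cons s rest ih => simp only [pvRunLen]; split <;> simp <;> omega

theorem pvRunLen_take (v : Int) (l : List Int) : ∀ x ∈ l.take (pvRunLen v l), x = v := by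
  induction l with
  | nil => simp
  | cons s rest ih =>
      simp only [pvRunLen]
      by_cases h : s = v
      · rw [if_pos h, show 1 + pvRunLen v rest = pvRunLen v rest + 1 by omega]
        intro x hx
        simp only [List.take_succ_cons, List.mem_cons] at hx
        rcases hx with hx | hx
        · exact hx ▸ h
        · exact ih x hx
      · rw [if_neg h]; simp

theorem pvRunLen_drop_head (v : Int) (l : List Int) (y : Int) (ys : List Int)
    (h : l.drop (pvRunLen v l) = y :: ys) : y ≠ v := by
  induction l with
  | nil => simp [pvRunLen] at h
  | cons s rest ih =>
      simp only [pvRunLen] at h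
      by_cases hs : s = v
      · rw [if_pos hs, show 1 + pvRunLen v rest = pvRunLen v rest + 1 by omega] at h
        simp only [List.drop_succ_cons] at h
        exact ih h
      · rw [if_neg hs] at h
        simp at h
        exact h.1 ▸ hs

theorem pvBGo_nil (_individual : String) (positions : List Int) (n i : Nat) :
    pvBGo _individual positions n i [] = [] := by
  simp [pvBGo]

theorem pvBGo_cons (individual : String) (positions : List Int) (n i : Nat) (s : Int) (rest : List Int) :
    pvBGo individual positions n i (s :: rest) =
      (if s = 0 then
        [(individual, (PySem.List.pyGet? positions (i : Int)).getD 0,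
          if i + 1 + pvRunLen s rest < n then
            (PySem.List.pyGet? positions (((i + 1 + pvRunLen s rest : Nat) : Int) - 1)).getD 0
          else (PySem.List.pyGet? positions (-1)).getD 0)]
      else []) ++ pvBGo individual positions n (i + 1 + pvRunLen s rest) (rest.drop (pvRunLen s rest)) := by
  rw [pvBGo.eq_def]

theorem pvAGo_acc (individual : String) (positions : List Int) (start : Option Int)
    (segs : List (String × Int × Int)) (i : Nat) (l : List Int) :
    pvAGo individual positions start segs i l = segs ++ pvAGo individual positions start [] i l := by
  induction l generalizing start segs i with
  | nil => cases start <;> simp [pvAGo]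
  | cons s rest ih =>
      simp only [pvAGo]
      split
      · cases start <;> simp only []
        · rw [ih, ih (segs := [])]
        · rw [ih, ih (segs := [])]
      · cases start <;> simp only []
        · rw [ih, ih (segs := [])]
        · rw [ih (segs := segs ++ _), ih (segs := [] ++ _)]
          simp
  
theorem pvAGo_skipNZ (individual : String) (positions : List Int)
    (segs : List (String × Int × Int)) (pre tail : List Int) (i : Nat)
    (h : ∀ x ∈ pre, x ≠ 0) :
    pvAGo individual positions none segs i (pre ++ tail) =
      pvAGo individual positions none segs (i + pre.length) tail := by
  induction pre generalizing i segs with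
  | nil => simp
  | cons s rest ih =>
      have hs : s ≠ 0 := h s (by simp)
      simp only [List.cons_append, pvAGo, if_neg hs]
      rw [ih _ _ (fun x hx => h x (by simp [hx]))]
      congr 1
      simp; omega

theorem pvAGo_skipZ (individual : String) (positions : List Int) (p : Int)
    (segs : List (String × Int × Int)) (pre tail : List Int) (i : Nat)
    (h : ∀ x ∈ pre, x = 0) :
    pvAGo individual positions (some p) segs i (pre ++ tail) =
      pvAGo individual positions (some p) segs (i + pre.length) tail := by
  induction pre generalizing i segs with
  | nil => simp
  | cons s rest ih =>
      have hs : s = 0 := h s (by simp)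
      simp only [List.cons_append, pvAGo, if_pos hs]
      rw [ih _ _ (fun x hx => h x (by simp [hx]))]
      congr 1
      simp; omega

theorem pv_main (individual : String) (positions : List Int) :
    ∀ (m : Nat) (l : List Int) (i n : Nat), l.length ≤ m → n = i + l.length →
      pvAGo individual positions none [] i l = pvBGo individual positions n i l := by
  intro m
  induction m with
  | zero =>
      intro l i n hm hn
      cases l with
      | nil => simp [pvAGo, pvBGo_nil]
      | cons s rest => simp at hm
  | succ m ih =>
      intro l i n hm hn
      cases l with
      | nil => simp [pvAGo, pvBGo_nil]
      | cons s rest =>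
        simp only [List.length_cons] at hm hn
        rw [pvBGo_cons]
        set r := pvRunLen s rest with hr
        have hrle : r ≤ rest.length := pvRunLen_le s rest
        have hsplit : rest = rest.take r ++ rest.drop r := (List.take_append_drop r rest).symm
        have htl : (rest.take r).length = r := by simp [List.length_take]; omega
        by_cases hs : s = 0
        · -- zero run: A sets start to positions[i], walks the run, flushes at the next non-zero
          subst hs
          rw [if_pos rfl]
          have h1 : pvAGo individual positions none [] i (0 :: rest) =
              pvAGo individual positions (some ((PySem.List.pyGet? positions (i : Int)).getD 0)) [] (i+1) rest := by
            simp [pvAGo]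
          have h2 : pvAGo individual positions (some ((PySem.List.pyGet? positions (i : Int)).getD 0)) [] (i+1) rest =
              pvAGo individual positions (some ((PySem.List.pyGet? positions (i : Int)).getD 0)) [] (i+1+r) (rest.drop r) := by
            conv_lhs => rw [hsplit]
            rw [pvAGo_skipZ _ _ _ _ _ _ _ (fun x hx => pvRunLen_take 0 rest x hx), htl]
          rw [h1, h2]
          cases hdrop : rest.drop r with
          | nil =>
              have hrlen : r = rest.length := by
                have := congrArg List.length hdrop; simp at this; omega
              have hj : ¬ (i + 1 + r < n) := by omega
              rw [if_neg hj, pvBGo_nil]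
              simp [pvAGo]
          | cons y ys =>
              have hy : y ≠ 0 := pvRunLen_drop_head 0 rest y ys hdrop
              have hlen : rest.length = r + (1 + ys.length) := by
                have := congrArg List.length hdrop; simp at this; omega
              have hj : i + 1 + r < n := by omega
              rw [if_pos hj]
              have h3 : pvAGo individual positions (some ((PySem.List.pyGet? positions (i : Int)).getD 0)) [] (i+1+r) (y :: ys) =
                  [(individual, (PySem.List.pyGet? positions (i : Int)).getD 0,
                    (PySem.List.pyGet? positions (((i+1+r : Nat) : Int) - 1)).getD 0)] ++
                  pvAGo individual positions none [] (i+1+r+1) ys := by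
                simp only [pvAGo, if_neg hy]
                rw [pvAGo_acc]
                simp
              have h4 : pvAGo individual positions none [] (i+1+r+1) ys =
                  pvAGo individual positions none [] (i+1+r) (y :: ys) := by
                simp only [pvAGo, if_neg hy]
              have hIH : pvAGo individual positions none [] (i+1+r) (y :: ys) =
                  pvBGo individual positions n (i+1+r) (y :: ys) := by
                apply ih
                · simp only [List.length_cons]; omega
                · simp only [List.length_cons]; omega
              rw [h3, h4, hIH]
        · -- non-zero run: A's start stays None across the run
          rw [if_neg hs]
          have h1 : pvAGo individual positions none [] i (s :: rest) =
              pvAGo individual positions none [] (i+1) rest := by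
            simp only [pvAGo, if_neg hs]
          have h2 : pvAGo individual positions none [] (i+1) rest =
              pvAGo individual positions none [] (i+1+r) (rest.drop r) := by
            conv_lhs => rw [hsplit]
            rw [pvAGo_skipNZ _ _ _ _ _ _ (fun x hx => (pvRunLen_take s rest x hx) ▸ hs), htl]
          have hIH : pvAGo individual positions none [] (i+1+r) (rest.drop r) =
              pvBGo individual positions n (i+1+r) (rest.drop r) := by
            apply ih
            · simp only [List.length_drop]; omega
            · simp only [List.length_drop]; omega
          rw [h1, h2, hIH]
          simp

-- ===== VERDICT (by name: the statement is the Claim_ definition above) =====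
theorem find_inbred_segments_spec : Claim_equal_find_inbred_segments := by
  intro individual positions states _hdom _hpre
  unfold Spec_find_inbred_segments find_inbred_segments find_inbred_segments_alt
  exact pv_main individual positions states.length states 0 states.length le_rfl (by simp)
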